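-- pv_equiv track=rewrite | github.com/ONSdigital/sbr-ui | sbr_ui/routes/api.py | format_children
-- ===== SOURCE A (Python) =====
-- def format_children(children: dict):
--     vats = []
--     chs = []
--     payes = []
--     leus = []
--
--     # Rather than a dict of unitId:unitType, we want a dict of unitType:[unitId's], to make parsing them in the
--     # template easier
--     for child_id, child_type in children.items():
--         if child_type == "VAT":
--             vats.append(child_id)
--         elif child_type == "CH":
--             chs.append(child_id)
--         elif child_type == "PAYE":
--             payes.append(child_id)
--         elif child_type == "LEU":
--             leus.append(child_id)
--
--     children = {"VAT": vats, "CH": chs, "PAYE": payes, "LEU": leus}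
--
--     # Filter empty arrays
--     return {k: v for k, v in children.items() if len(v) != 0}
-- ===== SOURCE B (Python) =====
-- def format_children(children: dict):
--     grouped = {t: [cid for cid, ct in children.items() if ct == t]
--                for t in ("VAT", "CH", "PAYE", "LEU")}
--     return {k: v for k, v in grouped.items() if v}
-- ===== Notes on version B (the rewrite author's own statement) =====
-- stated objective: idiomatic
-- what changed: Inverted the loop nesting: instead of one pass appending into four named accumulator lists and building/filtering a dict afterwards, B loops over the fixed type list and collects matching ids with a comprehension per type, then drops empty groups.
import Mathlib
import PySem

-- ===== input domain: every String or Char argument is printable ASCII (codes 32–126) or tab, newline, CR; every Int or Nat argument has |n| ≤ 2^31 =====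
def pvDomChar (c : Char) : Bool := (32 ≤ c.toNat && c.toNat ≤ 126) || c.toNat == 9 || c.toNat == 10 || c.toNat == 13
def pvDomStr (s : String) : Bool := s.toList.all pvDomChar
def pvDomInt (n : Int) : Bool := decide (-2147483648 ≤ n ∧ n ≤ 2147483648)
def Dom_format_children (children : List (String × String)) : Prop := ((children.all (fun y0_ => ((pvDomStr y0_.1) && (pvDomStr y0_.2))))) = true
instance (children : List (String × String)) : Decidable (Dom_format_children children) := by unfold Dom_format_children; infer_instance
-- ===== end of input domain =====

-- B inverts the loop nesting: it scans the pairs once per fixed unit type with a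
-- comprehension instead of one pass into four named accumulators (objective: idiomatic).


-- ===== PORT A =====
-- one pass over children.items(), appending into four accumulator lists
-- (the loop body, named so the proofs can speak about one step)
def pvStep (acc : List String × List String × List String × List String)
    (kv : String × String) : List String × List String × List String × List String :=
  let (vats, chs, payes, leus) := acc
  if kv.2 == "VAT" then (vats ++ [kv.1], chs, payes, leus)
  else if kv.2 == "CH" then (vats, chs ++ [kv.1], payes, leus)
  else if kv.2 == "PAYE" then (vats, chs, payes ++ [kv.1], leus)
  else if kv.2 == "LEU" then (vats, chs, payes, leus ++ [kv.1])
  else acc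

def format_children (children : List (String × String)) : List (String × List String) :=
  let s := children.foldl pvStep ([], [], [], [])
  ([("VAT", s.1), ("CH", s.2.1), ("PAYE", s.2.2.1), ("LEU", s.2.2.2)]).filter
    (fun p => p.2.length != 0)

-- ===== PORT B =====
-- loop over the fixed type list; per type a comprehension over the pairs; drop empty groups
def format_children_alt (children : List (String × String)) : List (String × List String) :=
  ((["VAT", "CH", "PAYE", "LEU"]).map
      (fun t => (t, (children.filter (fun kv => kv.2 == t)).map (fun kv => kv.1)))).filter
    (fun p => !p.2.isEmpty)

-- ===== PRECONDITION & SPEC =====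
def Spec_format_children (children : List (String × String)) (out : List (String × List String)) : Prop := out = format_children_alt children
instance (children : List (String × String)) (out : List (String × List String)) : Decidable (Spec_format_children children out) := by unfold Spec_format_children; infer_instance

-- ===== CLAIM (what is proved, stated in full; the proofs are below) =====
def Claim_equal_format_children : Prop := ∀ (children : List (String × String)), Dom_format_children children → Spec_format_children children (format_children children)

-- ===== LEMMAS AND PROOFS =====

-- ids of the pairs whose type is t (B's per-type comprehension)
def pvGrp (t : String) (xs : List (String × String)) : List String :=
  (xs.filter (fun kv => kv.2 == t)).map (fun kv => kv.1)

-- A's fold, started from arbitrary accumulators, appends exactly the four groups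
theorem pvFold_char (xs : List (String × String)) :
    ∀ (v c p l : List String),
      xs.foldl pvStep (v, c, p, l)
      = (v ++ pvGrp "VAT" xs, c ++ pvGrp "CH" xs, p ++ pvGrp "PAYE" xs, l ++ pvGrp "LEU" xs) := by
  induction xs with
  | nil => intro v c p l; simp [pvGrp]
  | cons hd tl ih =>
    intro v c p l
    rw [List.foldl_cons]
    by_cases h1 : hd.2 = "VAT"
    · rw [show pvStep (v, c, p, l) hd = (v ++ [hd.1], c, p, l) from by simp [pvStep, h1], ih]
      simp [pvGrp, h1]
    · by_cases h2 : hd.2 = "CH"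
      · rw [show pvStep (v, c, p, l) hd = (v, c ++ [hd.1], p, l) from by simp [pvStep, h1, h2], ih]
        simp [pvGrp, h1, h2]
      · by_cases h3 : hd.2 = "PAYE"
        · rw [show pvStep (v, c, p, l) hd = (v, c, p ++ [hd.1], l) from by simp [pvStep, h1, h2, h3], ih]
          simp [pvGrp, h1, h2, h3]
        · by_cases h4 : hd.2 = "LEU"
          · rw [show pvStep (v, c, p, l) hd = (v, c, p, l ++ [hd.1]) from by simp [pvStep, h1, h2, h3, h4], ih]
            simp [pvGrp, h1, h2, h3, h4]
          · rw [show pvStep (v, c, p, l) hd = (v, c, p, l) from by simp [pvStep, h1, h2, h3, h4], ih]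
            simp [pvGrp, h1, h2, h3, h4]

-- ===== VERDICT (by name: the statement is the Claim_ definition above) =====
theorem format_children_spec : Claim_equal_format_children := by
  intro children _
  show format_children children = format_children_alt children
  unfold format_children format_children_alt
  rw [pvFold_char children [] [] [] []]
  simp only [List.nil_append, List.map_cons, List.map_nil]
  apply List.filter_congr
  intro p _
  cases p.2 <;> simp
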